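-- pv_equiv track=rewrite | github.com/AchrafRT/sales-crm | core/xlsx_import.py | map_lead_fields
-- ===== SOURCE A (Python) =====
-- from typing import List, Dict, Any, Tuple
--
-- def map_lead_fields(raw: Dict[str, Any]) -> Dict[str, str]:
--     # normalize keys
--     def g(*keys: str) -> str:
--         for k in keys:
--             for rk, rv in raw.items():
--                 if (rk or '').strip().lower() == k:
--                     return (rv or '').strip()
--         return ''
--
--     name = g('business name', 'business_name', 'name', 'company', 'company name')
--     phone = g('business phone', 'business_phone', 'phone', 'telephone', 'tel')
--     address = g('business address', 'business_address', 'address', 'location')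
--     # if not found by exact, try fuzzy contains
--     if not (name or phone or address):
--         for rk, rv in raw.items():
--             lk = (rk or '').lower()
--             if not name and 'name' in lk:
--                 name = (rv or '').strip()
--             if not phone and ('phone' in lk or 'tel' in lk):
--                 phone = (rv or '').strip()
--             if not address and 'address' in lk:
--                 address = (rv or '').strip()
--
--     return {
--         'business_name': name,
--         'business_phone': phone,
--         'business_address': address,
--     }
-- ===== SOURCE B (Python) =====
-- def map_lead_fields(raw):
--     FIELDS = [
--         ('business_name', ['business name', 'business_name', 'name', 'company', 'company name']),
--         ('business_phone', ['business phone', 'business_phone', 'phone', 'telephone', 'tel']),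
--         ('business_address', ['business address', 'business_address', 'address', 'location']),
--     ]
--     # one pass: for each field keep (best priority, value); lowest candidate index
--     # wins, earliest column wins ties (strict <)
--     best = {field: None for field, _ in FIELDS}
--     for rk, rv in raw.items():
--         nk = (rk or '').strip().lower()
--         for field, keys in FIELDS:
--             if nk in keys:
--                 p = keys.index(nk)
--                 b = best[field]
--                 if b is None or p < b[0]:
--                     best[field] = (p, (rv or '').strip())
--     name = best['business_name'][1] if best['business_name'] is not None else ''
--     phone = best['business_phone'][1] if best['business_phone'] is not None else ''
--     address = best['business_address'][1] if best['business_address'] is not None else ''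
--     if not (name or phone or address):
--         for rk, rv in raw.items():
--             lk = (rk or '').lower()
--             if not name and 'name' in lk:
--                 name = (rv or '').strip()
--             if not phone and ('phone' in lk or 'tel' in lk):
--                 phone = (rv or '').strip()
--             if not address and 'address' in lk:
--                 address = (rv or '').strip()
--     return {
--         'business_name': name,
--         'business_phone': phone,
--         'business_address': address,
--     }
-- ===== Notes on version B (the rewrite author's own statement) =====
-- stated objective: faster
-- what changed: Instead of re-scanning the whole dict once per candidate key (three calls to g, each a nested loop over candidates x columns), B makes one pass over raw.items(), keeping for each of the three fields the best match as (candidate-list index, stripped value) updated only on strictly lower index, then applies the unchanged all-empty fuzzy fallback.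
import Mathlib
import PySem

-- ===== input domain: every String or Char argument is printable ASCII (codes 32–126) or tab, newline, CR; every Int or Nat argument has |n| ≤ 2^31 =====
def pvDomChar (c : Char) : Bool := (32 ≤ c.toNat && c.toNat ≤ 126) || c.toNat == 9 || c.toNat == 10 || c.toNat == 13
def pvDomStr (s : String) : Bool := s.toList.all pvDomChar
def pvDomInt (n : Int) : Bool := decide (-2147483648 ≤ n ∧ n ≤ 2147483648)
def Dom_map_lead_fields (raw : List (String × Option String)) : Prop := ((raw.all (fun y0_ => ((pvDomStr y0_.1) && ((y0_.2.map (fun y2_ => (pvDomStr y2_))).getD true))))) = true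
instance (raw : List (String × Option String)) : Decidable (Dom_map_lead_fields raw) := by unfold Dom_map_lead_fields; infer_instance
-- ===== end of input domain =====

-- B replaces A's per-candidate-key rescans of the dict (g) by ONE pass over the
-- items keeping, per field, the best (lowest candidate index, earliest column)
-- match; the fuzzy-contains fallback is kept unchanged. Objective: alternative.

-- ===== PORT A =====
-- shared helpers: '(rk or "").strip().lower()' and '(rv or "").strip()'
def pvNorm (s : String) : String := PySem.Str.lower (PySem.Str.strip s)
def pvVal (v : Option String) : String := PySem.Str.strip (v.getD "")

def pvNameKeys : List String := ["business name", "business_name", "name", "company", "company name"]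
def pvPhoneKeys : List String := ["business phone", "business_phone", "phone", "telephone", "tel"]
def pvAddrKeys : List String := ["business address", "business_address", "address", "location"]

-- inner loop of g: first column whose normalized key equals k
def pvFindKey (raw : List (String × Option String)) (k : String) : Option String :=
  match raw with
  | [] => none
  | (rk, rv) :: rest => if pvNorm rk = k then some (pvVal rv) else pvFindKey rest k

-- g(*keys): try each candidate key in order over the whole dict
def pvG (raw : List (String × Option String)) (ks : List String) : String :=
  match ks with
  | [] => ""
  | k :: ks' =>
    match pvFindKey raw k with
    | some v => v
    | none => pvG raw ks'

-- the fuzzy-contains fallback loop (identical source code in A and in B)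
def pvFuzzy (raw : List (String × Option String)) (st : String × String × String) :
    String × String × String :=
  raw.foldl (fun st col =>
    let lk := PySem.Str.lower col.1
    let n := if st.1 = "" ∧ PySem.Str.isIn "name" lk = true then pvVal col.2 else st.1
    let p := if st.2.1 = "" ∧ (PySem.Str.isIn "phone" lk = true ∨ PySem.Str.isIn "tel" lk = true)
             then pvVal col.2 else st.2.1
    let a := if st.2.2 = "" ∧ PySem.Str.isIn "address" lk = true then pvVal col.2 else st.2.2
    (n, p, a)) st

def map_lead_fields (raw : List (String × Option String)) : List (String × String) :=
  let name := pvG raw pvNameKeys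
  let phone := pvG raw pvPhoneKeys
  let address := pvG raw pvAddrKeys
  let res := if name = "" ∧ phone = "" ∧ address = "" then pvFuzzy raw (name, phone, address)
             else (name, phone, address)
  [("business_name", res.1), ("business_phone", res.2.1), ("business_address", res.2.2)]

-- ===== PORT B =====
-- one fold step: 'if nk in keys: p = keys.index(nk); update best on p < best[0]'
def pvStep (ks : List String) (b : Option (Nat × String)) (col : String × Option String) :
    Option (Nat × String) :=
  match PySem.List.index? ks (pvNorm col.1) with
  | none => b
  | some p =>
    match b with
    | none => some (p, pvVal col.2)
    | some (q, w) => if p < q then some (p, pvVal col.2) else some (q, w)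

def pvBest (raw : List (String × Option String)) (ks : List String) : Option (Nat × String) :=
  raw.foldl (pvStep ks) none

def pvBestVal (b : Option (Nat × String)) : String := (b.map Prod.snd).getD ""

def map_lead_fields_alt (raw : List (String × Option String)) : List (String × String) :=
  let name := pvBestVal (pvBest raw pvNameKeys)
  let phone := pvBestVal (pvBest raw pvPhoneKeys)
  let address := pvBestVal (pvBest raw pvAddrKeys)
  let res := if name = "" ∧ phone = "" ∧ address = "" then pvFuzzy raw (name, phone, address)
             else (name, phone, address)
  [("business_name", res.1), ("business_phone", res.2.1), ("business_address", res.2.2)]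

-- ===== PRECONDITION & SPEC =====
def Spec_map_lead_fields (raw : List (String × Option String)) (out : List (String × String)) : Prop := out = map_lead_fields_alt raw
instance (raw : List (String × Option String)) (out : List (String × String)) : Decidable (Spec_map_lead_fields raw out) := by unfold Spec_map_lead_fields; infer_instance

-- ===== CLAIM (what is proved, stated in full; the proofs are below) =====
def Claim_equal_map_lead_fields : Prop := ∀ (raw : List (String × Option String)), Dom_map_lead_fields raw → Spec_map_lead_fields raw (map_lead_fields raw)

-- ===== LEMMAS AND PROOFS =====

-- no candidate keys: the fold never updates
theorem pvFoldl_step_nil (raw : List (String × Option String)) (b : Option (Nat × String)) :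
    raw.foldl (pvStep []) b = b := by
  induction raw generalizing b with
  | nil => rfl
  | cons col rest ih =>
    simp only [List.foldl_cons]
    have : pvStep [] b col = b := by
      simp [pvStep, PySem.List.index?]
    rw [this, ih]

-- a best entry of priority 0 is never replaced (strict <)
theorem pvFoldl_step_zero (ks : List String) (raw : List (String × Option String)) (v : String) :
    raw.foldl (pvStep ks) (some (0, v)) = some (0, v) := by
  induction raw with
  | nil => rfl
  | cons col rest ih =>
    simp only [List.foldl_cons]
    have : pvStep ks (some (0, v)) col = some (0, v) := by
      unfold pvStep
      cases PySem.List.index? ks (pvNorm col.1) with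
      | none => rfl
      | some p => simp
    rw [this, ih]

-- if some column matches the head key k, the fold ends at (0, value of the first such column),
-- from any start state that is none or has priority ≥ 1
theorem pvFoldl_step_found (ks : List String) (k : String) (v : String) :
    ∀ (raw : List (String × Option String)) (b : Option (Nat × String)),
      pvFindKey raw k = some v →
      (b = none ∨ ∃ q w, b = some (q + 1, w)) →
      raw.foldl (pvStep (k :: ks)) b = some (0, v) := by
  intro raw
  induction raw with
  | nil => intro b h _; simp [pvFindKey] at h
  | cons col rest ih =>
    intro b hfind hb
    obtain ⟨rk, rv⟩ := col
    by_cases hk : pvNorm rk = k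
    · have hv : pvVal rv = v := by
        simpa [pvFindKey, hk] using hfind
      have hidx : PySem.List.index? (k :: ks) (pvNorm rk) = some 0 := by
        rw [hk]; exact PySem.List.index?_cons_self k ks
      have hstep : pvStep (k :: ks) b (rk, rv) = some (0, pvVal rv) := by
        unfold pvStep
        rw [hidx]
        rcases hb with rfl | ⟨q, w, rfl⟩
        · rfl
        · simp
      rw [List.foldl_cons, hstep, hv]
      exact pvFoldl_step_zero _ _ _
    · have hfind' : pvFindKey rest k = some v := by
        simpa [pvFindKey, hk] using hfind
      simp only [List.foldl_cons]
      apply ih _ hfind'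
      have hidx : PySem.List.index? (k :: ks) (pvNorm rk) =
          (PySem.List.index? ks (pvNorm rk)).map (· + 1) :=
        PySem.List.index?_cons_of_ne ks (Ne.symm hk)
      unfold pvStep
      rw [hidx]
      cases hi : PySem.List.index? ks (pvNorm rk) with
      | none => simpa using hb
      | some p =>
        rcases hb with rfl | ⟨q, w, rfl⟩
        · exact Or.inr ⟨p, _, rfl⟩
        · simp only [Option.map_some]
          by_cases hpq : p + 1 < q + 1
          · simp [hpq]
          · simp [hpq]

def pvShift (b : Option (Nat × String)) : Option (Nat × String) :=
  b.map (fun p => (p.1 + 1, p.2))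

-- if no column matches k, the fold over (k :: ks) is the fold over ks with priorities shifted
theorem pvFoldl_step_notfound (ks : List String) (k : String) :
    ∀ (raw : List (String × Option String)) (b : Option (Nat × String)),
      pvFindKey raw k = none →
      raw.foldl (pvStep (k :: ks)) (pvShift b) = pvShift (raw.foldl (pvStep ks) b) := by
  intro raw
  induction raw with
  | nil => intro b _; rfl
  | cons col rest ih =>
    intro b hfind
    obtain ⟨rk, rv⟩ := col
    have hk : pvNorm rk ≠ k := by
      intro h; simp [pvFindKey, h] at hfind
    have hfind' : pvFindKey rest k = none := by
      simpa [pvFindKey, hk] using hfind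
    simp only [List.foldl_cons]
    have hstep : pvStep (k :: ks) (pvShift b) (rk, rv) = pvShift (pvStep ks b (rk, rv)) := by
      unfold pvStep
      have hidx : PySem.List.index? (k :: ks) (pvNorm rk) =
          (PySem.List.index? ks (pvNorm rk)).map (· + 1) :=
        PySem.List.index?_cons_of_ne ks (Ne.symm hk)
      rw [hidx]
      cases hi : PySem.List.index? ks (pvNorm rk) with
      | none => rfl
      | some p =>
        cases b with
        | none => rfl
        | some qw =>
          obtain ⟨q, w⟩ := qw
          simp only [Option.map_some, pvShift]
          by_cases hpq : p < q
          · simp [hpq]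
          · simp [hpq]
    rw [hstep, ih _ hfind']

theorem pvBestVal_shift (b : Option (Nat × String)) : pvBestVal (pvShift b) = pvBestVal b := by
  cases b with
  | none => rfl
  | some p => rfl

-- the key equivalence: A's g equals B's single-pass best
theorem pvG_eq_best (raw : List (String × Option String)) (ks : List String) :
    pvG raw ks = pvBestVal (pvBest raw ks) := by
  induction ks with
  | nil => simp [pvG, pvBest, pvFoldl_step_nil, pvBestVal]
  | cons k ks ih =>
    cases hfind : pvFindKey raw k with
    | some v =>
      have : pvBest raw (k :: ks) = some (0, v) :=
        pvFoldl_step_found ks k v raw none hfind (Or.inl rfl)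
      simp [pvG, hfind, this, pvBestVal]
    | none =>
      have hshift : pvBest raw (k :: ks) = pvShift (pvBest raw ks) := by
        have := pvFoldl_step_notfound ks k raw none hfind
        simpa [pvBest, pvShift] using this
      simp [pvG, hfind, hshift, pvBestVal_shift, ih]

-- ===== VERDICT (by name: the statement is the Claim_ definition above) =====
theorem map_lead_fields_spec : Claim_equal_map_lead_fields := by
  intro raw _
  unfold Spec_map_lead_fields map_lead_fields map_lead_fields_alt
  simp only [pvG_eq_best]
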